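-- pv_equiv track=rewrite | github.com/garciaha/DE_daily_challenges | 2020-07-11/gravity.py | switch_gravity_on
-- ===== SOURCE A (Python) =====
-- def switch_gravity_on(number):
--     count = [0 for col in range(len(number[0]))]
--     for row in range(len(number)):
--         for col in range(len(number[row])):
--             count[col] += 1 if number[row][col] == "#" else 0
--     new_grid = [["-" for x in range(len(number[0]))] for y in range(len(number))]
--     for x in range(len(count)):
--         for y in range(count[x]):
--             new_grid[len(number) - y - 1][x] = "#"
--     return new_grid
-- ===== SOURCE B (Python) =====
-- def switch_gravity_on(number):
--     # Gravity by sorting: normalize each cell to a boolean "is '#'", pad ragged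
--     # rows with False up to the first row's width, then sort every column
--     # (False < True puts '-' on top, '#' at the bottom) and render back.
--     h, w = len(number), len(number[0])
--     norm = [[cell == "#" for cell in row] + [False] * (w - len(row)) for row in number]
--     cols = [sorted(row[x] for row in norm) for x in range(w)]
--     return [["#" if cols[x][y] else "-" for x in range(w)] for y in range(h)]
-- ===== Notes on version B (the rewrite author's own statement) =====
-- stated objective: alternative
-- what changed: B computes gravity by sorting: each cell is normalized to a boolean 'is #', ragged rows are padded, every column is sorted (False<True drops the '#'s to the bottom) and the sorted columns are rendered back to rows - no count table and no index scatter as in A.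
import Mathlib
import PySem

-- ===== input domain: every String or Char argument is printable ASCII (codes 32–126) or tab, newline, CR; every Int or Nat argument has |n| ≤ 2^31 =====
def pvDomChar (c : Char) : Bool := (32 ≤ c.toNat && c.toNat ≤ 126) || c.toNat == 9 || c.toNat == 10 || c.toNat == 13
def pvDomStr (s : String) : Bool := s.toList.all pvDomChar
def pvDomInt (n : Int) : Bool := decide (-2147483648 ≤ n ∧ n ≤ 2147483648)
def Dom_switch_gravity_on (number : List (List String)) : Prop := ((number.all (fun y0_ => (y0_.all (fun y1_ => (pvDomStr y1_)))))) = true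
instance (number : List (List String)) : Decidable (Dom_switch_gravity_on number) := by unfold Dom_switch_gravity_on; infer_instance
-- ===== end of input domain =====

-- B applies gravity by sorting each boolean-normalized column (False<True) instead of
-- A's count table scattered into a pre-built grid (objective: alternative algorithm).

-- ===== PORT A =====
-- literal transliteration: count array over range(len(number[0])), nested counting loops by index,
-- pre-built '-' grid, then scatter '#' from the bottom; list mutation ported as List.set
def switch_gravity_on (number : List (List String)) : List (List String) :=
  let count : List Nat := (List.range (number.headD []).length).map (fun _ => 0)
  let count := (List.range number.length).foldl (fun count row =>
      (List.range (number.getD row []).length).foldl (fun c col =>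
        c.set col (c.getD col 0 + if (number.getD row []).getD col "" == "#" then 1 else 0)) count)
    count
  let new_grid := (List.range number.length).map (fun _ =>
      (List.range (number.headD []).length).map (fun _ => "-"))
  (List.range count.length).foldl (fun g x =>
      (List.range (count.getD x 0)).foldl (fun g y =>
        g.set (number.length - y - 1) ((g.getD (number.length - y - 1) []).set x "#")) g) new_grid

-- ===== PORT B =====
-- literal transliteration of Source B: boolean normalization with padding, sorted() on each
-- column (PySem.List.sorted, identity key), then render by index.
-- 'row[x] for row in norm' is ported as getD, exact here since every padded row has length ≥ w.
def switch_gravity_on_alt (number : List (List String)) : List (List String) :=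
  let h := number.length
  let w := (number.headD []).length
  let norm := number.map (fun row =>
      row.map (fun cell => cell == "#") ++ List.replicate (w - row.length) false)
  let cols := (List.range w).map (fun x =>
      PySem.List.sorted (norm.map (fun row => row.getD x false)) (fun b => b) false)
  (List.range h).map (fun y => (List.range w).map (fun x =>
      if (cols.getD x []).getD y false then "#" else "-"))

-- ===== PRECONDITION & SPEC =====
-- Pre_ excludes exactly the inputs where A raises IndexError: the empty grid (number[0])
-- and ragged grids with a row longer than the first row (count[col] out of range).
def Pre_switch_gravity_on (number : List (List String)) : Prop :=
  number ≠ [] ∧ ∀ row ∈ number, row.length ≤ (number.headD []).length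
instance (number : List (List String)) : Decidable (Pre_switch_gravity_on number) := by
  unfold Pre_switch_gravity_on; infer_instance
def pvWitness_switch_gravity_on : List (List String) := [["#", "-"], ["-", "#"]]

def Spec_switch_gravity_on (number : List (List String)) (out : List (List String)) : Prop := out = switch_gravity_on_alt number
instance (number : List (List String)) (out : List (List String)) : Decidable (Spec_switch_gravity_on number out) := by unfold Spec_switch_gravity_on; infer_instance

-- ===== CLAIM (what is proved, stated in full; the proofs are below) =====
def Claim_equal_switch_gravity_on : Prop := ∀ (number : List (List String)), Dom_switch_gravity_on number → Pre_switch_gravity_on number → Spec_switch_gravity_on number (switch_gravity_on number)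

-- ===== LEMMAS AND PROOFS =====

-- column predicate, used only by the proofs
def pcol (x : Nat) (row : List String) : Bool := decide (x < row.length) && (row.getD x "" == "#")

lemma getD_set {α : Type} (l : List α) (n : Nat) (a : α) (i : Nat) (d : α) :
    (l.set n a).getD i d = if n = i ∧ n < l.length then a else l.getD i d := by
  simp only [List.getD_eq_getElem?_getD, List.getElem?_set]
  split_ifs with h1 h2 h3 <;> simp_all <;> omega

lemma list_ext_getD {α : Type} (d : α) {l1 l2 : List α} (hl : l1.length = l2.length)
    (h : ∀ i, i < l1.length → l1.getD i d = l2.getD i d) : l1 = l2 := by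
  apply List.ext_getElem hl
  intro i h1 h2
  have := h i h1
  simpa [List.getD_eq_getElem?_getD, List.getElem?_eq_getElem, h1, h2] using this

lemma getD_map_range {α : Type} (f : Nat → α) (n i : Nat) (d : α) :
    (((List.range n).map f).getD i d) = if i < n then f i else d := by
  rcases Nat.lt_or_ge i n with h | h
  · rw [if_pos h]
    simp [List.getD_eq_getElem?_getD, List.getElem?_range, h]
  · rw [if_neg (by omega)]
    simp [List.getD_eq_getElem?_getD, List.getElem?_range, Nat.not_lt.mpr h]

lemma count_inner (f : Nat → Nat) (m : Nat) (L : List Nat) (hm : m ≤ L.length) :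
    ((List.range m).foldl (fun c col => c.set col (c.getD col 0 + f col)) L).length = L.length ∧
    ∀ i, ((List.range m).foldl (fun c col => c.set col (c.getD col 0 + f col)) L).getD i 0
      = L.getD i 0 + if i < m then f i else 0 := by
  induction m with
  | zero => simp
  | succ m ih =>
    obtain ⟨ihl, ihd⟩ := ih (by omega)
    rw [List.range_succ, List.foldl_append]
    simp only [List.foldl_cons, List.foldl_nil]
    refine ⟨by rw [List.length_set, ihl], ?_⟩
    intro i
    rw [getD_set, ihl, ihd, ihd]
    by_cases h : m = i
    · subst h
      rw [if_pos (show m = m ∧ m < L.length from ⟨rfl, by omega⟩)]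
      rw [if_neg (lt_irrefl m), if_pos (by omega : m < m + 1)]
      omega
    · rw [if_neg (by tauto)]
      split_ifs <;> omega

lemma count_outer (number : List (List String))
    (hrows : ∀ row ∈ number, row.length ≤ (number.headD []).length) :
    ∀ r, r ≤ number.length →
    ((List.range r).foldl (fun count row =>
      (List.range (number.getD row []).length).foldl (fun c col =>
        c.set col (c.getD col 0 + if (number.getD row []).getD col "" == "#" then 1 else 0)) count)
      ((List.range (number.headD []).length).map (fun _ => (0:Nat)))).length
        = (number.headD []).length ∧
    ∀ x, ((List.range r).foldl (fun count row =>
      (List.range (number.getD row []).length).foldl (fun c col =>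
        c.set col (c.getD col 0 + if (number.getD row []).getD col "" == "#" then 1 else 0)) count)
      ((List.range (number.headD []).length).map (fun _ => (0:Nat)))).getD x 0
        = (number.take r).countP (pcol x) := by
  intro r
  induction r with
  | zero => simp
  | succ r ih =>
    intro hr
    obtain ⟨ihl, ihd⟩ := ih (by omega)
    rw [List.range_succ, List.foldl_append]
    simp only [List.foldl_cons, List.foldl_nil]
    have hrow : number.getD r [] ∈ number := by
      rw [List.getD_eq_getElem?_getD, List.getElem?_eq_getElem (by omega)]
      exact List.getElem_mem _
    have hm : (number.getD r []).length ≤ (number.headD []).length := hrows _ hrow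
    obtain ⟨cil, cid⟩ := count_inner
      (fun col => if (number.getD r []).getD col "" == "#" then 1 else 0)
      (number.getD r []).length _ (by rw [ihl]; exact hm)
    refine ⟨by rw [cil, ihl], ?_⟩
    intro x
    rw [cid, ihd]
    have hgd : number.getD r [] = number[r]'(by omega : r < number.length) := by
      rw [List.getD_eq_getElem?_getD, List.getElem?_eq_getElem (by omega : r < number.length)]
      rfl
    have h2 : number[r]? = some (number.getD r []) := by
      rw [List.getElem?_eq_getElem (by omega : r < number.length), hgd]
    rw [List.take_succ, List.countP_append, h2]
    simp only [Option.toList_some, List.countP_cons, List.countP_nil]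
    unfold pcol
    by_cases hx : x < (number.getD r []).length
    · rw [if_pos hx]
      simp only [decide_eq_true hx, Bool.true_and, Nat.zero_add]
    · rw [if_neg hx]
      simp only [decide_eq_false hx, Bool.false_and, Bool.false_eq_true, if_false, Nat.add_zero]

lemma scatter_inner (h x : Nat) (c : Nat) (g : List (List String))
    (hg : g.length = h) (hc : c ≤ h) :
    ((List.range c).foldl (fun g y =>
        g.set (h - y - 1) ((g.getD (h - y - 1) []).set x "#")) g).length = h ∧
    (∀ r, (((List.range c).foldl (fun g y =>
        g.set (h - y - 1) ((g.getD (h - y - 1) []).set x "#")) g).getD r []).length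
        = (g.getD r []).length) ∧
    ∀ r j, (((List.range c).foldl (fun g y =>
        g.set (h - y - 1) ((g.getD (h - y - 1) []).set x "#")) g).getD r []).getD j "-"
      = if j = x ∧ h - c ≤ r ∧ r < h ∧ x < (g.getD r []).length then "#"
        else (g.getD r []).getD j "-" := by
  induction c with
  | zero =>
    refine ⟨by simpa using hg, by simp, ?_⟩
    intro r j
    rw [if_neg (by omega)]
    simp
  | succ c ih =>
    obtain ⟨ihl, ihrl, ihd⟩ := ih (by omega)
    rw [List.range_succ, List.foldl_append]
    simp only [List.foldl_cons, List.foldl_nil]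
    refine ⟨by rw [List.length_set, ihl], ?_, ?_⟩
    · intro r
      rw [getD_set]
      split_ifs with h1
      · obtain ⟨he, -⟩ := h1
        subst he
        rw [List.length_set, ihrl]
      · exact ihrl r
    · intro r j
      rw [getD_set, ihl]
      by_cases h1 : h - c - 1 = r ∧ h - c - 1 < h
      · rw [if_pos h1]
        obtain ⟨he, hlt⟩ := h1
        subst he
        rw [getD_set, ihrl, ihd]
        rw [if_neg (show ¬(j = x ∧ h - c ≤ h - c - 1 ∧ h - c - 1 < h ∧
              x < (g.getD (h - c - 1) []).length) by omega)]
        split_ifs <;> first | rfl | omega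
      · rw [if_neg h1, ihd]
        split_ifs <;> first | rfl | omega

lemma scatter_outer (number : List (List String)) (C : List Nat) (w : Nat)
    (hC : ∀ x, C.getD x 0 ≤ number.length) :
    ∀ m,
    ((List.range m).foldl (fun g x =>
        (List.range (C.getD x 0)).foldl (fun g y =>
          g.set (number.length - y - 1) ((g.getD (number.length - y - 1) []).set x "#")) g)
      ((List.range number.length).map (fun _ =>
        (List.range w).map (fun _ => "-")))).length = number.length ∧
    (∀ r, (((List.range m).foldl (fun g x =>
        (List.range (C.getD x 0)).foldl (fun g y =>
          g.set (number.length - y - 1) ((g.getD (number.length - y - 1) []).set x "#")) g)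
      ((List.range number.length).map (fun _ =>
        (List.range w).map (fun _ => "-")))).getD r []).length
        = if r < number.length then w else 0) ∧
    ∀ r j, (((List.range m).foldl (fun g x =>
        (List.range (C.getD x 0)).foldl (fun g y =>
          g.set (number.length - y - 1) ((g.getD (number.length - y - 1) []).set x "#")) g)
      ((List.range number.length).map (fun _ =>
        (List.range w).map (fun _ => "-")))).getD r []).getD j "-"
      = if j < m ∧ j < w ∧ number.length - C.getD j 0 ≤ r ∧ r < number.length then "#"
        else "-" := by
  intro m
  induction m with
  | zero =>
    refine ⟨by simp, ?_, ?_⟩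
    · intro r
      simp only [List.range_zero, List.foldl_nil]
      rw [getD_map_range]
      split_ifs <;> simp
    · intro r j
      simp only [List.range_zero, List.foldl_nil]
      rw [if_neg (show ¬(j < 0 ∧ j < w ∧ number.length - C.getD j 0 ≤ r ∧
            r < number.length) by omega)]
      rw [getD_map_range]
      split_ifs with h1
      · rw [getD_map_range]
        split_ifs <;> rfl
      · rfl
  | succ m ih =>
    obtain ⟨ihl, ihrl, ihd⟩ := ih
    rw [List.range_succ, List.foldl_append]
    simp only [List.foldl_cons, List.foldl_nil]
    obtain ⟨sl, srl, sd⟩ := scatter_inner number.length m (C.getD m 0) _ ihl (hC m)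
    refine ⟨sl, ?_, ?_⟩
    · intro r
      rw [srl, ihrl]
    · intro r j
      rw [sd, ihrl, ihd]
      by_cases hj : j = m
      · subst hj
        split_ifs <;> first | rfl | omega
      · split_ifs <;> first | rfl | omega

-- B-side: sorting a boolean list puts all the Falses before all the Trues
lemma bool_perm (l : List Bool) :
    ((List.replicate (l.countP (fun b => !b)) false)
      ++ (List.replicate (l.countP (fun b => b)) true)).Perm l := by
  rw [List.perm_iff_count]
  intro a
  cases a <;> simp [List.count_eq_countP, List.countP_eq_length_filter]

lemma bool_sorted (l : List Bool) :
    PySem.List.sorted l (fun b => b) false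
      = (List.replicate (l.countP (fun b => !b)) false)
        ++ (List.replicate (l.countP (fun b => b)) true) := by
  have hpw : ((List.replicate (l.countP (fun b => !b)) false)
      ++ (List.replicate (l.countP (fun b => b)) true)).Pairwise (fun a b => a ≤ b) :=
    List.pairwise_append.mpr
      ⟨List.pairwise_replicate.mpr (Or.inr (le_refl _)),
       List.pairwise_replicate.mpr (Or.inr (le_refl _)),
       fun a ha b hb => by
        rw [List.eq_of_mem_replicate ha, List.eq_of_mem_replicate hb]
        exact Bool.false_le true⟩
  exact PySem.List.sorted_id_eq_of_perm_of_pairwise l _ (bool_perm l) hpw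

lemma repl_bool_entry (a b y : Nat) :
    ((List.replicate a false) ++ (List.replicate b true)).getD y false
      = if a ≤ y ∧ y < a + b then true else false := by
  simp only [List.getD_eq_getElem?_getD, List.getElem?_append, List.length_replicate,
    List.getElem?_replicate]
  split_ifs <;> simp_all <;> omega

-- entry x of a padded normalized row is exactly the column predicate pcol
lemma pad_getD (row : List String) (w x : Nat) (hle : row.length ≤ w) :
    ((row.map (fun cell => cell == "#")) ++ List.replicate (w - row.length) false).getD x false
      = pcol x row := by
  unfold pcol
  simp only [List.getD_eq_getElem?_getD, List.getElem?_append, List.length_map,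
    List.getElem?_replicate, List.getElem?_map]
  by_cases hx : x < row.length
  · rw [if_pos hx]
    simp [decide_eq_true hx, List.getD_eq_getElem?_getD, List.getElem?_eq_getElem hx]
  · rw [if_neg hx]
    simp only [decide_eq_false hx, Bool.false_and]
    split_ifs <;> rfl

-- ===== VERDICT (by name: the statement is the Claim_ definition above) =====
theorem switch_gravity_on_spec : Claim_equal_switch_gravity_on := by
  intro number _ hpre
  obtain ⟨hne, hrows⟩ := hpre
  unfold Spec_switch_gravity_on
  simp only [switch_gravity_on, switch_gravity_on_alt]
  obtain ⟨cl, cd⟩ := count_outer number hrows number.length le_rfl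
  simp only [List.take_length] at cd
  rw [cl]
  have hC : ∀ x, ((List.range number.length).foldl (fun count row =>
      (List.range (number.getD row []).length).foldl (fun c col =>
        c.set col (c.getD col 0 + if (number.getD row []).getD col "" == "#" then 1 else 0)) count)
      ((List.range (number.headD []).length).map (fun _ => (0:Nat)))).getD x 0 ≤ number.length := by
    intro x
    rw [cd x]
    exact List.countP_le_length
  obtain ⟨gl, grl, gd⟩ := scatter_outer number _ (number.headD []).length hC
      (number.headD []).length
  refine list_ext_getD ([] : List String) (by rw [gl]; simp) ?_
  intro r hr
  rw [gl] at hr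
  rw [getD_map_range, if_pos hr]
  refine list_ext_getD "-" (by rw [grl, if_pos hr]; simp) ?_
  intro j hj
  rw [grl, if_pos hr] at hj
  -- B's entry at (r, j)
  have hcolmap : (number.map (fun row =>
        row.map (fun cell => cell == "#") ++ List.replicate ((number.headD []).length - row.length) false)).map
        (fun row => row.getD j false)
      = number.map (pcol j) := by
    rw [List.map_map]
    apply List.map_congr_left
    intro row hrow
    exact pad_getD row _ j (hrows row hrow)
  rw [gd r j, getD_map_range, if_pos hj, getD_map_range, if_pos hj]
  rw [hcolmap, bool_sorted, repl_bool_entry]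
  rw [cd j]
  have hsplit : ((number.map (pcol j)).countP (fun b => !b))
      + ((number.map (pcol j)).countP (fun b => b)) = number.length := by
    have := List.length_eq_countP_add_countP (fun b => (b : Bool)) (l := number.map (pcol j))
    simp only [List.length_map] at this
    rw [this]
    have : (number.map (pcol j)).countP (fun b => !b)
        = (number.map (pcol j)).countP (fun b => ¬ (b = true)) := by
      apply List.countP_congr
      intro b _; cases b <;> simp
    omega
  have hcnt : (number.map (pcol j)).countP (fun b => b) = number.countP (pcol j) := by
    rw [List.countP_map]
    apply List.countP_congr
    intro row _; rfl
  rw [hcnt] at hsplit ⊢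
  have hcle : number.countP (pcol j) ≤ number.length := List.countP_le_length
  split_ifs <;> first | rfl | omega | simp_all | (exfalso; omega)
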